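-- pv_equiv track=rewrite | github.com/Xa4Xakum/inline_invoice_bot | operations.py | add_tabs
-- ===== SOURCE A (Python) =====
-- def add_tabs(total: str):
--     total_with_tabs = ''
--     iterator = 3 - len(total) % 3
--     for i in total:
--         total_with_tabs += i
--         iterator += 1
--         if iterator % 3 == 0:
--             total_with_tabs += ' '
--
--     return total_with_tabs
-- ===== SOURCE B (Python) =====
-- def add_tabs(total: str):
--     if not total:
--         return ''
--     offset = len(total) % 3 or 3
--     chunks = [total[:offset]] + [total[i:i + 3] for i in range(offset, len(total), 3)]
--     return ' '.join(chunks) + ' '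
-- ===== Notes on version B (the rewrite author's own statement) =====
-- stated objective: simpler
-- what changed: Replaces the per-character loop with a modular counter by computing the chunk boundaries up front (first chunk of length len%3 or 3, then size-3 slices) and joining the chunks with single spaces plus the trailing space.
import Mathlib
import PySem

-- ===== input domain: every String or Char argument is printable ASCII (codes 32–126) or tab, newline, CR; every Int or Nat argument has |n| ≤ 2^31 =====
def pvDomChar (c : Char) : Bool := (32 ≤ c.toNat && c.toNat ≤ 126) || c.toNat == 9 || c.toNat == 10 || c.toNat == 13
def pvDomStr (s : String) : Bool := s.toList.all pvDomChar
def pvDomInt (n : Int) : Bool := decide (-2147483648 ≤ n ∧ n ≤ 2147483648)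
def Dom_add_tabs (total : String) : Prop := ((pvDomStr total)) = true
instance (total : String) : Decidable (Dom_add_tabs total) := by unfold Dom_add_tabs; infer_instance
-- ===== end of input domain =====

-- B computes the chunk boundaries up front (first chunk of len%3-or-3, then size-3 slices)
-- and joins them with single spaces plus the trailing space, instead of A's per-character
-- loop with a modular counter; objective: simpler decomposition.

-- ===== PORT A =====
-- the loop body of A: append the character, bump the counter, emit ' ' on a multiple of 3
def pvStepA (st : List Char × Nat) (i : Char) : List Char × Nat :=
  let acc := st.1 ++ [i]
  let it := st.2 + 1
  if it % 3 = 0 then (acc ++ [' '], it) else (acc, it)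

def add_tabs (total : String) : String :=
  let r := total.toList.foldl pvStepA ([], 3 - total.toList.length % 3)
  String.mk r.1

-- ===== PORT B =====
-- the size-3 slices total[offset:offset+3], total[offset+3:offset+6], … of Source B's list comprehension
def pvChunks3 (l : List Char) : List (List Char) :=
  match l with
  | [] => []
  | a :: rest => (a :: rest.take 2) :: pvChunks3 (rest.drop 2)
termination_by l.length
decreasing_by simp only [List.length_drop, List.length_cons]; omega

def add_tabs_alt (total : String) : String :=
  let l := total.toList
  if l = [] then ""
  else
    let offset := if l.length % 3 = 0 then 3 else l.length % 3
    let chunks := l.take offset :: pvChunks3 (l.drop offset)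
    String.mk ((chunks.intersperse [' ']).flatten ++ [' '])

-- ===== PRECONDITION & SPEC =====
def Spec_add_tabs (total : String) (out : String) : Prop := out = add_tabs_alt total
instance (total : String) (out : String) : Decidable (Spec_add_tabs total out) := by unfold Spec_add_tabs; infer_instance

-- ===== CLAIM (what is proved, stated in full; the proofs are below) =====
def Claim_equal_add_tabs : Prop := ∀ (total : String), Dom_add_tabs total → Spec_add_tabs total (add_tabs total)

-- ===== LEMMAS AND PROOFS =====

-- the characters emitted by A's loop starting from counter `it` with empty accumulator
def pvF : List Char → Nat → List Char
  | [], _ => []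
  | c :: cs, it => if (it + 1) % 3 = 0 then c :: ' ' :: pvF cs (it + 1) else c :: pvF cs (it + 1)

theorem pvFoldA (l : List Char) (acc : List Char) (it : Nat) :
    (l.foldl pvStepA (acc, it)).1 = acc ++ pvF l it := by
  induction l generalizing acc it with
  | nil => simp [pvF]
  | cons c cs ih =>
    simp only [List.foldl_cons, pvF]
    by_cases h : (it + 1) % 3 = 0
    · rw [show pvStepA (acc, it) c = (acc ++ [c, ' '], it + 1) by simp [pvStepA, h]]
      rw [ih]; simp [h]
    · rw [show pvStepA (acc, it) c = (acc ++ [c], it + 1) by simp [pvStepA, h]]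
      rw [ih]; simp [h]

theorem pvF_period (l : List Char) (it : Nat) : pvF l (it + 3) = pvF l it := by
  induction l generalizing it with
  | nil => rfl
  | cons c cs ih =>
    simp only [pvF]
    have h : (it + 3 + 1) % 3 = (it + 1) % 3 := by omega
    rw [h]
    have h2 : it + 3 + 1 = (it + 1) + 3 := by omega
    rw [h2, ih]

theorem pvChunks3_nil : pvChunks3 ([] : List Char) = [] := by
  rw [pvChunks3.eq_def]

theorem pvChunks3_cons (a : Char) (rest : List Char) :
    pvChunks3 (a :: rest) = (a :: rest.take 2) :: pvChunks3 (rest.drop 2) := by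
  rw [pvChunks3.eq_def]

theorem pvF_period2 (l : List Char) : pvF l 6 = pvF l 0 := by
  have h1 : pvF l 6 = pvF l 3 := by simpa using pvF_period l 3
  have h2 : pvF l 3 = pvF l 0 := by simpa using pvF_period l 0
  rw [h1, h2]

theorem pvChunksC (n : Nat) : ∀ l : List Char, l.length ≤ n → l.length % 3 = 0 →
    pvF l 0 = (pvChunks3 l).flatMap (· ++ [' ']) := by
  induction n with
  | zero =>
    intro l hlen _
    have : l = [] := by cases l <;> simp_all
    subst this; simp [pvF, pvChunks3_nil]
  | succ n ih =>
    intro l hlen hmod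
    match l with
    | [] => simp [pvF, pvChunks3_nil]
    | [a] => simp at hmod
    | [a, b] => simp at hmod
    | a :: b :: c :: v =>
      have hv : v.length % 3 = 0 := by simp at hmod; omega
      have hvlen : v.length ≤ n := by simp at hlen; omega
      simp only [pvF]
      norm_num
      have h3 : pvF v 3 = pvF v 0 := by simpa using pvF_period v 0
      rw [h3, ih v hvlen hv]
      simp [pvChunks3_cons, List.flatMap]

theorem pvJoin (c : List Char) (cs : List (List Char)) :
    (((c :: cs).intersperse [' ']).flatten ++ [' ']) = (c :: cs).flatMap (· ++ [' ']) := by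
  induction cs generalizing c with
  | nil => simp
  | cons d ds ih =>
    have := ih d
    simp only [List.intersperse, List.flatten, List.flatMap, List.map] at *
    simp_all

theorem pvMain (l : List Char) (hne : l ≠ []) :
    pvF l (3 - l.length % 3) =
      (l.take (if l.length % 3 = 0 then 3 else l.length % 3) ::
        pvChunks3 (l.drop (if l.length % 3 = 0 then 3 else l.length % 3))).flatMap (· ++ [' ']) := by
  have hm : l.length % 3 = 0 ∨ l.length % 3 = 1 ∨ l.length % 3 = 2 := by omega
  rcases hm with hm | hm | hm
  · match l with
    | [] => exact absurd rfl hne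
    | [a] => simp at hm
    | [a, b] => simp at hm
    | a :: b :: c :: v =>
      have hv : v.length % 3 = 0 := by simp at hm; omega
      rw [hm]
      simp only [pvF]
      norm_num
      rw [pvF_period2 v, pvChunksC v.length v le_rfl hv]
  · match l with
    | [] => exact absurd rfl hne
    | a :: v =>
      have hv : v.length % 3 = 0 := by simp at hm ⊢; omega
      rw [hm]
      simp only [pvF]
      norm_num
      have h3 : pvF v 3 = pvF v 0 := by simpa using pvF_period v 0
      rw [h3, pvChunksC v.length v le_rfl hv]
  · match l with
    | [] => exact absurd rfl hne
    | [a] => simp at hm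

    | a :: b :: v =>
      have hv : v.length % 3 = 0 := by simp at hm ⊢; omega
      rw [hm]
      simp only [pvF]
      norm_num
      have h3 : pvF v 3 = pvF v 0 := by simpa using pvF_period v 0
      rw [h3, pvChunksC v.length v le_rfl hv]

theorem add_tabs_spec : Claim_equal_add_tabs := by
  intro total _
  unfold Spec_add_tabs add_tabs add_tabs_alt
  simp only [pvFoldA]
  by_cases h : total.toList = []
  · simp only [h, List.length_nil]
    simp [pvF]
    rfl
  · rw [if_neg h, pvJoin, pvMain total.toList h]
    simp
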